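-- pv_equiv track=rewrite | github.com/KAnti-VP/python | dictionary/poem_dict.py | betudarabszam
-- ===== SOURCE A (Python) =====
-- def betudarabszam(text):
--     betuk = {}
--     for kar in text.lower(): #
--         if kar not in ',. \n':
--             if kar in betuk:
--                 betuk[kar] += 1
--             else:
--                 betuk[kar] = 1
--     return betuk
-- ===== SOURCE B (Python) =====
-- def betudarabszam(text):
--     # Two-stage counting-table algorithm (counting-sort style): pass 1 tallies
--     # each kept character into a direct-address table indexed by ASCII code;
--     # pass 2 walks the text again and emits each character the first time it is
--     # seen, with its precomputed total.
--     low = text.lower()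
--     counts = [0] * 128
--     for k in low:
--         if k not in ',. \n':
--             counts[ord(k)] += 1
--     out = {}
--     for k in low:
--         if k not in ',. \n' and k not in out:
--             out[k] = counts[ord(k)]
--     return out
-- ===== Notes on version B (the rewrite author's own statement) =====
-- stated objective: alternative
-- what changed: B replaces A's single-pass hash-increment loop with a two-stage counting-table algorithm: pass 1 tallies kept characters into a 128-entry direct-address array indexed by ASCII code, pass 2 walks the text again and emits each character on its first occurrence with its precomputed total.
import Mathlib
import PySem

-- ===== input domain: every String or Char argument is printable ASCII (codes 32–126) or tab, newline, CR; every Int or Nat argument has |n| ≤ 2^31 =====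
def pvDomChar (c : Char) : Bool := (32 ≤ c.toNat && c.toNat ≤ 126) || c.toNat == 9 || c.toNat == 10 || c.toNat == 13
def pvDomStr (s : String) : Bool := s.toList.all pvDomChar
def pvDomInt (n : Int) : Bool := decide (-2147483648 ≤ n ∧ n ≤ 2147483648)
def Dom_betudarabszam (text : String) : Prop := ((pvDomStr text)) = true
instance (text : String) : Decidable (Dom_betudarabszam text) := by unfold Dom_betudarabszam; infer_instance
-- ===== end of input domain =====

-- B replaces A's single-pass hash-increment loop by a two-stage counting-table
-- algorithm (128-entry direct-address array, then a first-occurrence emission pass);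
-- objective: alternative decomposition (not claimed faster).

-- ===== PORT A =====
-- A: one pass over text.lower(); skip ',', '.', ' ', '\n'; increment-or-initialise a dict entry.
def betudarabszam (text : String) : List (String × Int) :=
  ((PySem.Str.lower text).toList.foldl
    (fun (d : PySem.Dict String Int) kar =>
      if ([',', '.', ' ', '\n'].contains kar) then d
      else
        let k := String.singleton kar
        if d.contains k then d.insert k (d.getD k 0 + 1) else d.insert k 1)
    PySem.Dict.empty).items

-- ===== PORT B =====
-- B pass 1: counts[ord(k)] += 1 for kept chars. 'counts[ord(k)]' is ported as
-- List.getD/List.set at index k.toNat — exact for chars with code < 128 (all of Dom;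
-- Python would raise IndexError above 127, outside Dom nothing is claimed).
def pvCountsTable (low : List Char) : List Int :=
  low.foldl
    (fun (t : List Int) k =>
      if ([',', '.', ' ', '\n'].contains k) then t
      else t.set k.toNat (t.getD k.toNat 0 + 1))
    (List.replicate 128 0)

-- B pass 2: 'k not in out' = first occurrence; insert precomputed total.
def betudarabszam_alt (text : String) : List (String × Int) :=
  let low := (PySem.Str.lower text).toList
  let counts := pvCountsTable low
  (low.foldl
    (fun (d : PySem.Dict String Int) k =>
      if ([',', '.', ' ', '\n'].contains k) then d
      else
        let s := String.singleton k
        if d.contains s then d else d.insert s (counts.getD k.toNat 0))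
    PySem.Dict.empty).items

-- ===== PRECONDITION & SPEC =====
def Spec_betudarabszam (text : String) (out : List (String × Int)) : Prop := out = betudarabszam_alt text
instance (text : String) (out : List (String × Int)) : Decidable (Spec_betudarabszam text out) := by unfold Spec_betudarabszam; infer_instance

-- ===== CLAIM (what is proved, stated in full; the proofs are below) =====
def Claim_equal_betudarabszam : Prop := ∀ (text : String), Dom_betudarabszam text → Spec_betudarabszam text (betudarabszam text)

-- ===== LEMMAS AND PROOFS =====

-- A's loop body on a non-skipped character is exactly 'insert k (getD k 0 + 1)'.
theorem betudarabszam_step (d : PySem.Dict String Int) (k : String) :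
    (if d.contains k then d.insert k (d.getD k 0 + 1) else d.insert k 1)
      = d.insert k (d.getD k 0 + 1) := by
  by_cases h : d.contains k = true
  · simp [h]
  · have h0 : d.contains k = false := by simp_all
    rw [PySem.Dict.getD_of_not_contains (d := d) (k := k) (d0 := 0) h0]
    simp [h0]

-- A = counter over the kept 1-char strings, as dedup-map-count.
theorem betudarabszam_eq_dedup_count (text : String) :
    betudarabszam text
      = (PySem.List.dedup (((PySem.Str.lower text).toList.filter
            (fun c => !([',', '.', ' ', '\n'].contains c))).map String.singleton)).map
          (fun k => (k, ((((PySem.Str.lower text).toList.filter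
            (fun c => !([',', '.', ' ', '\n'].contains c))).map String.singleton).count k : Int))) := by
  unfold betudarabszam
  rw [show (fun (d : PySem.Dict String Int) kar =>
      if ([',', '.', ' ', '\n'].contains kar) then d
      else
        let k := String.singleton kar
        if d.contains k then d.insert k (d.getD k 0 + 1) else d.insert k 1)
    = (fun (d : PySem.Dict String Int) kar =>
      if !([',', '.', ' ', '\n'].contains kar) then
        d.insert (String.singleton kar) (d.getD (String.singleton kar) 0 + 1)
      else d) from by
      funext d kar
      simp only [betudarabszam_step]
      cases h : [',', '.', ' ', '\n'].contains kar <;> simp_all]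
  rw [PySem.List.foldl_if_eq_foldl_filter]
  rw [← List.foldl_map (f := String.singleton)
      (g := fun (d : PySem.Dict String Int) k => d.insert k (d.getD k 0 + 1))]
  rw [PySem.Dict.foldl_insert_getD_add_one_eq_counter]
  rw [PySem.Dict.items_counter]
  simp [PySem.List.dedup_eq_ofList]

-- B's pass-2 loop ('insert if absent') appends, per first occurrence, the pair
-- (key, f key): its items are d.items ++ (new first occurrences).map (k, f k).
theorem foldl_insert_if_absent_items {κ ν : Type} [BEq κ] [LawfulBEq κ]
    (f : κ → ν) (l : List κ) (d : PySem.Dict κ ν) :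
    (l.foldl (fun d x => if d.contains x then d else d.insert x (f x)) d).items
      = d.items ++ ((PySem.List.dedup l).filter (fun x => !d.contains x)).map (fun k => (k, f k)) := by
  induction l generalizing d with
  | nil => simp [PySem.List.dedup, PySem.Set.ofList]
  | cons x l ih =>
    simp only [List.foldl_cons]
    rw [show PySem.List.dedup (x :: l) = x :: (PySem.List.dedup l).filter (fun y => !y == x) from by
      simp only [PySem.List.dedup_eq_ofList]
      rw [PySem.Set.ofList_cons]
      rfl]
    by_cases h : d.contains x = true
    · rw [h]
      simp only [if_true, ih]
      congr 1
      simp only [List.filter_cons, h, Bool.not_true]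
      simp only [Bool.false_eq_true, if_false]
      rw [List.filter_filter]
      congr 1
      apply List.filter_congr
      intro y hy
      by_cases hyx : y = x
      · subst hyx; simp [h]
      · simp [hyx]
    · have h0 : d.contains x = false := by simp_all
      rw [h0]
      simp only [Bool.false_eq_true, if_false, ih]
      rw [PySem.Dict.items_insert_of_not_contains d (f x) h0]
      rw [List.append_assoc]
      congr 1
      simp only [List.filter_cons, h0, Bool.not_false, if_true]
      simp only [List.map_cons, List.singleton_append]
      congr 1
      rw [List.filter_filter]
      congr 1
      apply List.filter_congr
      intro y hy
      rw [PySem.Dict.contains_insert]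
      by_cases hyx : y = x
      · subst hyx; simp
      · have hne : (y == x) = false := by simp [hyx]
        simp [hne]

-- The counting table after pass 1: entry c.toNat holds the number of occurrences
-- of c in the processed characters (all codes below 128, table length 128).
theorem counts_table_getD (c : Char) (hc : c.toNat < 128) :
    ∀ (l : List Char) (t : List Int), (∀ x ∈ l, x.toNat < 128) → t.length = 128 →
    (l.foldl (fun (t : List Int) k => t.set k.toNat (t.getD k.toNat 0 + 1)) t).getD c.toNat 0
      = t.getD c.toNat 0 + (l.count c : Int)
  | [], t, _, _ => by simp
  | x :: l, t, hl, ht => by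
    have hx : x.toNat < 128 := hl x (by simp)
    have hlen : (t.set x.toNat (t.getD x.toNat 0 + 1)).length = 128 := by simp [ht]
    rw [List.foldl_cons,
      counts_table_getD c hc l _ (fun y hy => hl y (List.mem_cons_of_mem _ hy)) hlen]
    by_cases hcx : c = x
    · subst hcx
      rw [List.getD_eq_getElem?_getD, List.getElem?_set_self (by omega)]
      simp only [Option.getD_some, List.count_cons_self]
      push_cast
      ring
    · have hne : c.toNat ≠ x.toNat := by
        intro h
        exact hcx (Char.ext (UInt32.toNat_inj.mp h))
      rw [List.getD_eq_getElem?_getD, List.getElem?_set_ne (by omega),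
          ← List.getD_eq_getElem?_getD]
      have hcount : List.count c (x :: l) = List.count c l := by
        rw [List.count_cons]
        simp only [beq_iff_eq]
        rw [if_neg (fun h => hcx h.symm)]
        omega
      rw [hcount]

-- lowering a char with code < 128 keeps the code < 128
theorem lowerChar_lt_128 (c : Char) (h : c.toNat < 128) :
    (PySem.Chars.lowerChar c).toNat < 128 := by
  unfold PySem.Chars.lowerChar PySem.Chars.isupper
  split_ifs with hu
  · rw [Char.toNat_ofNat]
    have hv : (c.toNat + 32).isValidChar := Or.inl (by omega)
    have h2 : c.toNat ≤ 90 := by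
      have := (Bool.and_eq_true _ _ |>.mp hu).2
      have hz : c ≤ 'Z' := of_decide_eq_true this
      rw [Char.le_def] at hz
      exact hz
    simp [hv]
    omega
  · exact h

theorem singleton_injective : Function.Injective String.singleton := by
  intro a b h
  have := congrArg String.toList h
  simpa [String.singleton] using this

-- ===== VERDICT (by name: the statement is the Claim_ definition above) =====
theorem betudarabszam_spec : Claim_equal_betudarabszam := by
  intro text hdom
  unfold Spec_betudarabszam
  have hlow : ∀ x ∈ (PySem.Str.lower text).toList, x.toNat < 128 := by
    rw [PySem.Str.toList_lower, PySem.Chars.lower]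
    intro x hx
    obtain ⟨c, hc, rfl⟩ := List.mem_map.mp hx
    have hdom' : text.toList.all pvDomChar = true := hdom
    have hdc : pvDomChar c = true := List.all_eq_true.mp hdom' c hc
    apply lowerChar_lt_128
    simp [pvDomChar] at hdc
    omega
  have hkept128 : ∀ x ∈ (PySem.Str.lower text).toList.filter
      (fun c => !([',', '.', ' ', '\n'].contains c)), x.toNat < 128 :=
    fun x hx => hlow x (List.mem_of_mem_filter hx)
  -- pass 1: the table entry of each kept char is its count among kept chars
  have hcounts : ∀ c ∈ (PySem.Str.lower text).toList.filter
      (fun c => !([',', '.', ' ', '\n'].contains c)),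
      (pvCountsTable (PySem.Str.lower text).toList).getD c.toNat 0
        = (((PySem.Str.lower text).toList.filter
            (fun c => !([',', '.', ' ', '\n'].contains c))).count c : Int) := by
    intro c hcmem
    unfold pvCountsTable
    rw [show (fun (t : List Int) k =>
        if ([',', '.', ' ', '\n'].contains k) then t
        else t.set k.toNat (t.getD k.toNat 0 + 1))
      = (fun (t : List Int) k =>
        if !([',', '.', ' ', '\n'].contains k) then t.set k.toNat (t.getD k.toNat 0 + 1) else t) from by
        funext t k
        cases h : [',', '.', ' ', '\n'].contains k <;> simp [h]]
    rw [PySem.List.foldl_if_eq_foldl_filter]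
    rw [counts_table_getD c (hkept128 c hcmem) _ _ hkept128 (by simp)]
    rw [List.getD_eq_getElem?_getD, List.getElem?_replicate]
    split_ifs <;> simp
  -- pass 2: flip the guard, filter, and view the loop as a loop over 1-char strings
  show betudarabszam text =
    ((PySem.Str.lower text).toList.foldl
      (fun (d : PySem.Dict String Int) k =>
        if ([',', '.', ' ', '\n'].contains k) then d
        else
          let s := String.singleton k
          if d.contains s then d
          else d.insert s ((pvCountsTable (PySem.Str.lower text).toList).getD k.toNat 0))
      PySem.Dict.empty).items
  rw [show (fun (d : PySem.Dict String Int) k =>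
      if ([',', '.', ' ', '\n'].contains k) then d
      else
        let s := String.singleton k
        if d.contains s then d
        else d.insert s ((pvCountsTable (PySem.Str.lower text).toList).getD k.toNat 0))
    = (fun (d : PySem.Dict String Int) k =>
      if !([',', '.', ' ', '\n'].contains k) then
        (if d.contains (String.singleton k) then d
         else d.insert (String.singleton k)
           ((pvCountsTable (PySem.Str.lower text).toList).getD
             (((String.singleton k).toList.headD ' ').toNat) 0))
      else d) from by
      funext d k
      cases h : [',', '.', ' ', '\n'].contains k <;> simp [h, String.singleton]]
  rw [PySem.List.foldl_if_eq_foldl_filter]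
  rw [← List.foldl_map (f := String.singleton)
      (g := fun (d : PySem.Dict String Int) s =>
        if d.contains s then d
        else d.insert s ((pvCountsTable (PySem.Str.lower text).toList).getD
          ((s.toList.headD ' ').toNat) 0))]
  rw [foldl_insert_if_absent_items
      (f := fun s => (pvCountsTable (PySem.Str.lower text).toList).getD
        ((s.toList.headD ' ').toNat) 0)
      (l := ((PySem.Str.lower text).toList.filter
        (fun k => !([',', '.', ' ', '\n'].contains k))).map String.singleton)
      (d := PySem.Dict.empty)]
  rw [betudarabszam_eq_dedup_count]
  have hemp : (PySem.Dict.empty : PySem.Dict String Int).items = [] := rfl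
  simp only [hemp, PySem.Dict.contains_empty, Bool.not_false,
    List.filter_true, List.nil_append]
  apply List.map_congr_left
  intro s hs
  have hsmem : s ∈ ((PySem.Str.lower text).toList.filter
      (fun c => !([',', '.', ' ', '\n'].contains c))).map String.singleton :=
    (PySem.List.mem_dedup _ _).mp hs
  obtain ⟨c, hcmem, rfl⟩ := List.mem_map.mp hsmem
  have h1 : (String.singleton c).toList.headD ' ' = c := by simp [String.singleton]
  rw [h1, hcounts c hcmem,
    List.count_map_of_injective _ String.singleton singleton_injective c]
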